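-- pv_equiv track=rewrite | github.com/erikahutieva/inf_bez | vigenere.py | len_words
-- ===== SOURCE A (Python) =====
-- def len_words(plaintext: str, keyword: str)->str:
--     word=keyword
--     num_word=[]
--
--     while len(word)< len(plaintext):
--         word+=keyword
--
--     for i in range(len(plaintext)):
--         if 'A' <= word[i] <= 'Z':
--             num_word.append(int(ord(word[i])-ord('A')))
--         elif 'a' <= word[i] <= 'z':
--             num_word.append(int(ord(word[i])-ord('a')))
--     return num_word
-- ===== SOURCE B (Python) =====
-- def len_words(plaintext, keyword):
--     if not keyword:
--         return []
--     shifts = []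
--     for c in keyword:
--         if 'A' <= c <= 'Z':
--             shifts.append(ord(c) - ord('A'))
--         elif 'a' <= c <= 'z':
--             shifts.append(ord(c) - ord('a'))
--         else:
--             shifts.append(None)
--     k = len(keyword)
--     return [s for s in (shifts[i % k] for i in range(len(plaintext))) if s is not None]
-- ===== Notes on version B (the rewrite author's own statement) =====
-- stated objective: alternative
-- what changed: B never materialises a repeated keyword string: it precomputes a once-per-keyword shift table (None for non-letters) and produces the answer in one pass over plaintext indices via modular lookup shifts[i % k], whereas A grows a string by repeated concatenation until it covers the plaintext and then scans it; Pre_ excludes only empty keyword with non-empty plaintext, where A's while loop never terminates and B returns [].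
import Mathlib
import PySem

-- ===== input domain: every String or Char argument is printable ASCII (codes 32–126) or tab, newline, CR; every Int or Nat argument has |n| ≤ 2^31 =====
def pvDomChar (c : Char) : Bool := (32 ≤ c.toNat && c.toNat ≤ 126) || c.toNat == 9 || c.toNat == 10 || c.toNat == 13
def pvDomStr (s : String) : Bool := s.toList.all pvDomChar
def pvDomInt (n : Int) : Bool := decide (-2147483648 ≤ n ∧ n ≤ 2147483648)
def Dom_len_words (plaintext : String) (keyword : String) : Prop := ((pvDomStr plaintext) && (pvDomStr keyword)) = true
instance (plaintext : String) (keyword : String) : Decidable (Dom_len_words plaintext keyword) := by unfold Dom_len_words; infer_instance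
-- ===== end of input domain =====

-- B replaces A's repeat-until-long-enough string growth with a once-built per-keyword shift
-- table consulted by modular index in one pass over plaintext positions (objective: alternative).


-- shared letter-to-shift branch logic (A's if/elif branches; B's table entry)
def shiftChar (c : Char) : Option Int :=
  if 'A' ≤ c ∧ c ≤ 'Z' then some ((c.toNat : Int) - 65)
  else if 'a' ≤ c ∧ c ≤ 'z' then some ((c.toNat : Int) - 97)
  else none

-- ===== PORT A =====
-- the 'while len(word) < len(plaintext): word += keyword' loop; fuel only makes it total
-- (inside Pre_ the fuel never runs out: each step adds ≥ 1 character)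
def buildA (word kw : List Char) (L fuel : Nat) : List Char :=
  match fuel with
  | 0 => word
  | fuel + 1 => if word.length < L then buildA (word ++ kw) kw L fuel else word

def len_words (plaintext : String) (keyword : String) : List Int :=
  let pl := plaintext.toList
  let word := buildA keyword.toList keyword.toList pl.length pl.length
  -- for i in range(len(plaintext)): word[i] is always in range inside Pre_, so getD is exact
  (List.range pl.length).foldl (fun acc i =>
    match shiftChar (word.getD i ' ') with
    | some s => acc ++ [s]
    | none => acc) []

-- ===== PORT B =====
def len_words_alt (plaintext : String) (keyword : String) : List Int :=
  let kl := keyword.toList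
  if kl.isEmpty then []
  else
    let shifts := kl.map shiftChar
    let k := kl.length
    (List.range plaintext.toList.length).filterMap (fun i => shifts.getD (i % k) none)

-- ===== PRECONDITION & SPEC =====
-- Pre_ excludes only empty keyword with non-empty plaintext, where A's while loop never terminates.
def Pre_len_words (plaintext : String) (keyword : String) : Prop :=
  keyword.toList ≠ [] ∨ plaintext.toList = []
instance (plaintext : String) (keyword : String) : Decidable (Pre_len_words plaintext keyword) := by
  unfold Pre_len_words; infer_instance
def pvWitness_len_words : String × String := ("Attack at Dawn!", "LeMoN")

def Spec_len_words (plaintext : String) (keyword : String) (out : List Int) : Prop := out = len_words_alt plaintext keyword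
instance (plaintext : String) (keyword : String) (out : List Int) : Decidable (Spec_len_words plaintext keyword out) := by unfold Spec_len_words; infer_instance

-- ===== CLAIM (what is proved, stated in full; the proofs are below) =====
def Claim_equal_len_words : Prop := ∀ (plaintext : String) (keyword : String), Dom_len_words plaintext keyword → Pre_len_words plaintext keyword → Spec_len_words plaintext keyword (len_words plaintext keyword)

-- ===== LEMMAS AND PROOFS =====

theorem length_flatten_replicate (m : Nat) (kl : List Char) :
    ((List.replicate m kl).flatten).length = m * kl.length := by
  induction m with
  | zero => simp
  | succ m ih => simp [List.replicate_succ, ih, Nat.succ_mul]; ring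

-- A's while loop appends whole copies of kw and stops with length ≥ L (given enough fuel)
theorem buildA_spec (kl : List Char) (hk : kl ≠ []) :
    ∀ (fuel : Nat) (word : List Char) (L : Nat), L ≤ word.length + fuel →
      ∃ m, buildA word kl L fuel = word ++ (List.replicate m kl).flatten ∧
           L ≤ (buildA word kl L fuel).length := by
  intro fuel
  induction fuel with
  | zero =>
    intro word L hL
    exact ⟨0, by simp [buildA], by simpa [buildA] using hL⟩
  | succ fuel ih =>
    intro word L hL
    by_cases h : word.length < L
    · have hk1 : 1 ≤ kl.length := List.length_pos_iff.mpr hk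
      have hL' : L ≤ (word ++ kl).length + fuel := by
        simp only [List.length_append]; omega
      obtain ⟨m, hm, hlen⟩ := ih (word ++ kl) L hL'
      refine ⟨m + 1, ?_, ?_⟩
      · simp only [buildA, if_pos h, hm, List.replicate_succ, List.flatten_cons,
          List.append_assoc]
      · simpa [buildA, if_pos h] using hlen
    · exact ⟨0, by simp [buildA, h], by simp [buildA, h]; omega⟩

-- A's accumulating index loop over range L = a filterMap over range L reading w by index
theorem foldl_range_eq_filterMap (w : List Char) :
    ∀ (L : Nat) (acc : List Int),
      (List.range L).foldl (fun acc i =>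
        match shiftChar (w.getD i ' ') with
        | some s => acc ++ [s]
        | none => acc) acc
      = acc ++ (List.range L).filterMap (fun i => shiftChar (w.getD i ' ')) := by
  intro L
  induction L with
  | zero => intro acc; simp
  | succ L ih =>
    intro acc
    rw [List.range_succ, List.foldl_append, ih acc, List.filterMap_append]
    simp only [List.foldl_cons, List.foldl_nil, List.filterMap_cons, List.filterMap_nil]
    cases h : shiftChar (w.getD L ' ') <;> simp [h, List.append_assoc]

-- indexing a flattened replication is modular indexing of one copy
theorem getD_flatten_replicate (kl : List Char) (hk : kl ≠ []) (d : Char) :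
    ∀ (m i : Nat), i < m * kl.length →
      ((List.replicate m kl).flatten).getD i d = kl.getD (i % kl.length) d := by
  have hk1 : 1 ≤ kl.length := List.length_pos_iff.mpr hk
  intro m
  induction m with
  | zero => intro i hi; omega
  | succ m ih =>
    intro i hi
    rw [List.replicate_succ, List.flatten_cons]
    by_cases h : i < kl.length
    · rw [List.getD_append _ _ _ _ h, Nat.mod_eq_of_lt h]
    · push_neg at h
      have : i - kl.length < m * kl.length := by
        have : (m + 1) * kl.length = m * kl.length + kl.length := by ring
        omega
      rw [List.getD_append_right _ _ _ _ h, ih (i - kl.length) this,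
        Nat.mod_eq_sub_mod h]

-- B's table lookup = shiftChar of the modularly-indexed keyword character
theorem getD_map_shiftChar (kl : List Char) (j : Nat) (hj : j < kl.length) :
    (kl.map shiftChar).getD j none = shiftChar (kl.getD j ' ') := by
  rw [List.getD_eq_getElem _ _ (by simpa using hj), List.getElem_map,
    List.getD_eq_getElem _ _ hj]

-- ===== VERDICT (by name: the statement is the Claim_ definition above) =====
theorem len_words_spec : Claim_equal_len_words := by
  intro plaintext keyword _ hpre
  unfold Spec_len_words len_words len_words_alt
  simp only []
  set pl := plaintext.toList with hpl
  set kl := keyword.toList with hkl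
  by_cases hk : kl = []
  · have hpl0 : pl = [] := by
      rcases hpre with h | h
      · exact absurd hk h
      · exact h
    simp [hk, hpl0, buildA]
  · have hk1 : 1 ≤ kl.length := List.length_pos_iff.mpr hk
    obtain ⟨m, hm, hlen⟩ := buildA_spec kl hk pl.length kl pl.length (by omega)
    rw [foldl_range_eq_filterMap _ pl.length [], hm] at *
    have hall : kl ++ (List.replicate m kl).flatten = (List.replicate (m + 1) kl).flatten := by
      simp [List.replicate_succ]
    rw [hall]
    have hLm : pl.length ≤ (m + 1) * kl.length := by
      have := hlen
      rw [hall] at this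
      simpa [length_flatten_replicate] using this
    have hne : kl.isEmpty = false := by simpa [List.isEmpty_iff] using hk
    rw [List.nil_append, if_neg (by simp [hne])]
    apply List.filterMap_congr
    intro i hi
    have hiL : i < pl.length := List.mem_range.mp hi
    rw [getD_flatten_replicate kl hk ' ' (m + 1) i (by omega),
      getD_map_shiftChar kl (i % kl.length) (Nat.mod_lt _ (by omega))]
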